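-- pv_equiv track=rewrite | github.com/debjitbis08/concept-learner | src/concept_learner/tokenizer.py | _digit_positions
-- ===== SOURCE A (Python) =====
-- from typing import List, Optional
--
-- def _digit_positions(toks: List[str]) -> List[int]:
--     # Compute per-token digit place (0=ones,1=tens,...) for contiguous numeric spans,
--     # non-digit tokens get 0 by default. We scan contiguous [sign][digits...] groups.
--     pos = [0] * len(toks)
--     i = 0
--     while i < len(toks):
--         # detect signed number span
--         j = i
--         saw_sign = False
--         if toks[j] in ['+', '-']:
--             saw_sign = True
--             j += 1
--         k = j
--         while k < len(toks) and toks[k].isdigit():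
--             k += 1
--         if k > j:  # we have digits from j..k-1
--             width = k - j
--             # assign positions from right to left
--             for t in range(j, k):
--                 # t from j..k-1, position index from rightmost
--                 pos[t] = (k - 1 - t)
--             # optional: mark sign token position as 0
--             if saw_sign:
--                 pos[i] = 0
--             i = k
--         else:
--             i = i + 1
--     return pos
-- ===== SOURCE B (Python) =====
-- from typing import List
--
-- def _digit_positions(toks: List[str]) -> List[int]:
--     # Single right-to-left pass: a counter counts the digit run seen so far
--     # from the right and resets on any non-digit token (signs are non-digits,
--     # so they separate runs and keep position 0 exactly as the span scan does).
--     pos = [0] * len(toks)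
--     counter = 0
--     for idx in range(len(toks) - 1, -1, -1):
--         if toks[idx].isdigit():
--             pos[idx] = counter
--             counter += 1
--         else:
--             counter = 0
--     return pos
-- ===== Notes on version B (the rewrite author's own statement) =====
-- stated objective: simpler
-- what changed: Replaces the span-detection outer while-loop with nested digit-run scan, per-run assignment loop and sign special-case by one right-to-left pass keeping a single counter that resets at non-digit tokens.
import Mathlib
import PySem

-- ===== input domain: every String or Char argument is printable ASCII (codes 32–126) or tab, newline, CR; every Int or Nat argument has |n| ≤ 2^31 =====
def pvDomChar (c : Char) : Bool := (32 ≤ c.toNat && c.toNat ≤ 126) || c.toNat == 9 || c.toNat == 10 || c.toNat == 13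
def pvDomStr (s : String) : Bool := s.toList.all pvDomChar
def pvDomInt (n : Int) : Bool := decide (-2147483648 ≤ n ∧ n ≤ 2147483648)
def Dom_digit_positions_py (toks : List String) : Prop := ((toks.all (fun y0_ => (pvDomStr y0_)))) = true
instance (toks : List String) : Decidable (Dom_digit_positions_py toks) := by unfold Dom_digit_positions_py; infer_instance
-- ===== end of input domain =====

-- B replaces A's span-detection while-loop (sign check, inner digit scan, per-run
-- assignment loop) by one right-to-left pass with a counter resetting at non-digits.

-- ===== PORT A =====
-- inner 'while k < len(toks) and toks[k].isdigit(): k += 1'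
def pvFindEnd (toks : List String) (k : Nat) : Nat :=
  if k < toks.length ∧ PySem.Str.strIsdigit (toks.getD k "") then pvFindEnd toks (k + 1) else k
termination_by toks.length - k
decreasing_by omega

-- 'for t in range(j, k): pos[t] = k - 1 - t'
def pvAssignRun (pos : List Int) (j k : Nat) : List Int :=
  if j < k then pvAssignRun (pos.set j ((k : Int) - 1 - (j : Int))) (j + 1) k else pos
termination_by k - j

def pvALoop (toks : List String) (pos : List Int) (i : Nat) : List Int :=
  if h : i < toks.length then
    let sawSign := (toks.getD i "") = "+" ∨ (toks.getD i "") = "-"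
    let j := if sawSign then i + 1 else i
    let k := pvFindEnd toks j
    if hk : k > j then
      let pos1 := pvAssignRun pos j k
      let pos2 := if sawSign then pos1.set i 0 else pos1
      pvALoop toks pos2 k
    else
      pvALoop toks pos (i + 1)
  else pos
termination_by toks.length - i
decreasing_by
  · simp only [k, j, sawSign] at hk
    by_cases hc : (toks.getD i "" = "+" ∨ toks.getD i "" = "-") <;>
      simp only [hc, dif_pos, dif_neg, not_false_iff] at hk ⊢ <;> omega
  · omega

def digit_positions_py (toks : List String) : List Int :=
  pvALoop toks (List.replicate toks.length 0) 0

-- ===== PORT B =====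
-- right-to-left pass: returns (pos list, counter carried further left)
def pvBRec (toks : List String) : List Int × Int :=
  match toks with
  | [] => ([], 0)
  | t :: rest =>
      let (p, c) := pvBRec rest
      if PySem.Str.strIsdigit t then (c :: p, c + 1) else (0 :: p, 0)

def digit_positions_py_alt (toks : List String) : List Int :=
  (pvBRec toks).1

-- ===== PRECONDITION & SPEC =====
def Spec_digit_positions_py (toks : List String) (out : List Int) : Prop := out = digit_positions_py_alt toks
instance (toks : List String) (out : List Int) : Decidable (Spec_digit_positions_py toks out) := by unfold Spec_digit_positions_py; infer_instance

-- ===== CLAIM (what is proved, stated in full; the proofs are below) =====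
def Claim_equal_digit_positions_py : Prop := ∀ (toks : List String), Dom_digit_positions_py toks → Spec_digit_positions_py toks (digit_positions_py toks)

-- ===== LEMMAS AND PROOFS =====

theorem pvFindEnd_ge (toks : List String) (k : Nat) : k ≤ pvFindEnd toks k := by
  unfold pvFindEnd
  split
  · have := pvFindEnd_ge toks (k + 1); omega
  · exact le_refl k
termination_by toks.length - k
decreasing_by rename_i h; omega

-- descending place values w-1, w-2, …, 0
def pvRevRange (n : Nat) : List Int := (List.range n).reverse.map (fun m => (m : Int))

theorem pvRevRange_succ (n : Nat) : pvRevRange (n + 1) = (n : Int) :: pvRevRange n := by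
  simp [pvRevRange, List.range_succ]

theorem pvRevRange_length (n : Nat) : (pvRevRange n).length = n := by
  simp [pvRevRange]

theorem pvFindEnd_le (toks : List String) (k : Nat) (hk : k ≤ toks.length) :
    pvFindEnd toks k ≤ toks.length := by
  unfold pvFindEnd
  split
  · rename_i h; exact pvFindEnd_le toks (k + 1) (by omega)
  · exact hk
termination_by toks.length - k
decreasing_by rename_i h; omega

theorem pvFindEnd_stop (toks : List String) (k : Nat) :
    pvFindEnd toks k < toks.length →
    PySem.Str.strIsdigit (toks.getD (pvFindEnd toks k) "") = false := by
  unfold pvFindEnd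
  split
  · rename_i h; exact pvFindEnd_stop toks (k + 1)
  · rename_i h
    intro hlt
    by_contra hd
    exact h ⟨hlt, by simpa using hd⟩
termination_by toks.length - k
decreasing_by omega

-- characterisation of B's pass across one maximal digit run starting at j
theorem pvBRec_run (toks : List String) (j : Nat) :
    (pvBRec (toks.drop j)).1 =
      pvRevRange (pvFindEnd toks j - j) ++ (pvBRec (toks.drop (pvFindEnd toks j))).1 ∧
    (pvBRec (toks.drop j)).2 = ((pvFindEnd toks j - j : Nat) : Int) := by
  unfold pvFindEnd
  split
  · rename_i h
    obtain ⟨hlt, hd⟩ := h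
    have hdrop : toks.drop j = toks.getD j "" :: toks.drop (j + 1) := by
      rw [List.getD_eq_getElem _ _ hlt]
      exact List.drop_eq_getElem_cons hlt
    obtain ⟨ih1, ih2⟩ := pvBRec_run toks (j + 1)
    have hge : j + 1 ≤ pvFindEnd toks (j + 1) := pvFindEnd_ge toks (j + 1)
    rw [hdrop]
    simp only [pvBRec, hd, if_true, ih1, ih2]
    constructor
    · have h1 : pvFindEnd toks (j + 1) - j = (pvFindEnd toks (j + 1) - (j + 1)) + 1 := by omega
      rw [h1, pvRevRange_succ]
      have h2 : ((pvFindEnd toks (j + 1) - (j + 1) : Nat) : Int)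
          = ((pvFindEnd toks (j + 1) - j - 1 : Nat) : Int) := by
        congr 1
      simp [h2]
    · omega
  · rename_i h
    constructor
    · simp [pvRevRange]
    · by_cases hlt : j < toks.length
      · have hd : PySem.Str.strIsdigit (toks.getD j "") = false := by
          by_contra hc
          exact h ⟨hlt, by simpa using hc⟩
        have hdrop : toks.drop j = toks.getD j "" :: toks.drop (j + 1) := by
          rw [List.getD_eq_getElem _ _ hlt]
          exact List.drop_eq_getElem_cons hlt
        rw [hdrop]
        simp only [pvBRec, hd]
        simp
      · rw [List.drop_eq_nil_of_le (by omega)]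
        simp [pvBRec]
termination_by toks.length - j
decreasing_by rename_i h; omega

-- assignRun writes the descending values over pos[j:k]
theorem pvAssignRun_eq (pos : List Int) (j k : Nat) (hj : j ≤ k) (hk : k ≤ pos.length) :
    pvAssignRun pos j k = pos.take j ++ pvRevRange (k - j) ++ pos.drop k := by
  unfold pvAssignRun
  split
  · rename_i h
    have hjl : j < pos.length := by omega
    rw [pvAssignRun_eq _ (j + 1) k (by omega) (by simpa using hk)]
    rw [List.set_eq_take_cons_drop _ hjl]
    have hw : k - j = (k - j - 1) + 1 := by omega
    have hv : ((k : Int) - 1 - (j : Int)) = ((k - j - 1 : Nat) : Int) := by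
      omega
    rw [List.take_append, List.drop_append]
    simp only [List.length_take, List.take_take, List.drop_eq_nil_of_le (by simp; omega : (pos.take j).length ≤ k)]
    have hmin : min (j + 1) j = j := by omega
    have hmin2 : min j pos.length = j := by omega
    rw [hmin, hmin2]
    have h1 : j + 1 - j = 1 := by omega
    have h2 : k - j = (k - j - 1) + 1 := hw
    rw [h1, h2]
    simp only [List.take_succ_cons, List.take_zero, List.drop_succ_cons]
    rw [List.drop_drop]
    have h3 : j + 1 + (k - j - 1) = k := by omega
    have h4 : k - (j + 1) = k - j - 1 := by omega
    rw [h3, h4, pvRevRange_succ, hv]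
    simp
  · rename_i h
    have : j = k := by omega
    subst this
    simp [pvRevRange, List.take_append_drop]
termination_by k - j

-- pushing the all-zeros invariant to a later index
theorem pvDropRepl (pos : List Int) (toks : List String) (i m : Nat)
    (hz : pos.drop i = List.replicate (toks.length - i) 0) (him : i ≤ m) :
    pos.drop m = List.replicate (toks.length - m) 0 := by
  have h1 : pos.drop m = (pos.drop i).drop (m - i) := by
    rw [List.drop_drop]; congr 1; omega
  rw [h1, hz, List.drop_replicate]; congr 1; omega

-- main loop invariant
theorem pvALoop_eq (toks : List String) (i : Nat) (pos : List Int)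
    (hlen : pos.length = toks.length)
    (hz : pos.drop i = List.replicate (toks.length - i) 0) :
    pvALoop toks pos i = pos.take i ++ (pvBRec (toks.drop i)).1 := by
  unfold pvALoop
  split
  · rename_i h
    have hdropi : toks.drop i = toks.getD i "" :: toks.drop (i + 1) := by
      rw [List.getD_eq_getElem _ _ h]
      exact List.drop_eq_getElem_cons h
    have hposi : pos[i]? = some 0 := by
      have h0 : pos[i]? = (pos.drop i)[0]? := by
        rw [List.getElem?_drop]
        simp
      rw [h0, hz]
      rw [List.getElem?_replicate]
      simp
      omega
    have htake1 : pos.take (i + 1) = pos.take i ++ [(0 : Int)] := by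
      rw [List.take_add_one, hposi]
      rfl
    have hz1 : pos.drop (i + 1) = List.replicate (toks.length - (i + 1)) 0 :=
      pvDropRepl pos toks i (i + 1) hz (by omega)
    by_cases hs : (toks.getD i "" = "+" ∨ toks.getD i "" = "-")
    · have hd0 : PySem.Str.strIsdigit (toks.getD i "") = false := by
        rcases hs with h1 | h1 <;> rw [h1] <;> decide
      have hBi : (pvBRec (toks.drop i)).1 = 0 :: (pvBRec (toks.drop (i + 1))).1 := by
        rw [hdropi]
        simp only [pvBRec, hd0]
        simp
      simp only [hs, if_true]
      set k := pvFindEnd toks (i + 1) with hkdef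
      have hk1 : i + 1 ≤ k := pvFindEnd_ge toks (i + 1)
      have hkle : k ≤ toks.length := pvFindEnd_le toks (i + 1) (by omega)
      have hposk : pos.drop k = List.replicate (toks.length - k) 0 :=
        pvDropRepl pos toks i k hz (by omega)
      split
      · rename_i hk
        rw [pvAssignRun_eq pos (i + 1) k (by omega) (by omega), htake1]
        have hset : ((pos.take i ++ [(0 : Int)]) ++ (pvRevRange (k - (i + 1)) ++ pos.drop k)).set i 0
            = (pos.take i ++ [(0 : Int)]) ++ (pvRevRange (k - (i + 1)) ++ pos.drop k) := by
          rw [List.set_append]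
          have hlt : i < (pos.take i ++ [(0 : Int)]).length := by
            simp
            omega
          rw [if_pos hlt, List.set_append]
          have hni : ¬ i < (pos.take i).length := by simp
          rw [if_neg hni]
          have hmi : i - min i pos.length = 0 := by omega
          simp [hmi]
        have hassoc : (pos.take i ++ [(0 : Int)]) ++ pvRevRange (k - (i + 1)) ++ pos.drop k
            = (pos.take i ++ [(0 : Int)]) ++ (pvRevRange (k - (i + 1)) ++ pos.drop k) := by
          simp [List.append_assoc]
        rw [hassoc, hset]
        have hlenpre : ((pos.take i ++ [(0 : Int)]) ++ (pvRevRange (k - (i + 1)))).length = k := by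
          simp [pvRevRange_length]
          omega
        rw [show (pos.take i ++ [(0 : Int)]) ++ (pvRevRange (k - (i + 1)) ++ pos.drop k)
              = ((pos.take i ++ [(0 : Int)]) ++ pvRevRange (k - (i + 1))) ++ pos.drop k by
            simp [List.append_assoc]]
        rw [pvALoop_eq toks k _ (by simp [pvRevRange_length]; omega) (by rw [List.drop_left' hlenpre]; exact hposk)]
        rw [List.take_left' hlenpre, hBi]
        obtain ⟨hr1, _⟩ := pvBRec_run toks (i + 1)
        rw [hr1, ← hkdef]
        simp
      · rename_i hk
        rw [pvALoop_eq toks (i + 1) pos hlen hz1, htake1, hBi]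
        simp
    · simp only [hs, if_false]
      set k := pvFindEnd toks i with hkdef
      have hk1 : i ≤ k := pvFindEnd_ge toks i
      have hkle : k ≤ toks.length := pvFindEnd_le toks i (by omega)
      have hposk : pos.drop k = List.replicate (toks.length - k) 0 :=
        pvDropRepl pos toks i k hz (by omega)
      obtain ⟨hr1, _⟩ := pvBRec_run toks i
      split
      · rename_i hk
        rw [pvAssignRun_eq pos i k (by omega) (by omega)]
        have hlenpre : (pos.take i ++ pvRevRange (k - i)).length = k := by
          simp [pvRevRange_length]
          omega
        rw [show pos.take i ++ pvRevRange (k - i) ++ pos.drop k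
              = (pos.take i ++ pvRevRange (k - i)) ++ pos.drop k by simp [List.append_assoc]]
        rw [pvALoop_eq toks k _ (by simp [pvRevRange_length]; omega) (by rw [List.drop_left' hlenpre]; exact hposk)]
        rw [List.take_left' hlenpre, hr1, ← hkdef]
        simp
      · rename_i hk
        have hki : k = i := by omega
        have hd0 : PySem.Str.strIsdigit (toks.getD i "") = false := by
          by_contra hc
          have hc' : PySem.Str.strIsdigit (toks.getD i "") = true := by simpa using hc
          have h2 : pvFindEnd toks i = pvFindEnd toks (i + 1) := by
            conv_lhs => rw [pvFindEnd]
            rw [if_pos ⟨h, hc'⟩]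
          have h3 := pvFindEnd_ge toks (i + 1)
          omega
        have hBi : (pvBRec (toks.drop i)).1 = 0 :: (pvBRec (toks.drop (i + 1))).1 := by
          rw [hdropi]
          simp only [pvBRec, hd0]
          simp
        have htake1' : pos.take (i + 1) = pos.take i ++ [(0 : Int)] := by
          rw [List.take_add_one, hposi]
          rfl
        rw [pvALoop_eq toks (i + 1) pos hlen hz1, htake1', hBi]
        simp
  · rename_i h
    rw [List.drop_eq_nil_of_le (by omega), List.take_of_length_le (by omega)]
    simp [pvBRec]

-- ===== VERDICT (by name: the statement is the Claim_ definition above) =====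
theorem digit_positions_py_spec : Claim_equal_digit_positions_py := by
  intro toks _
  unfold Spec_digit_positions_py digit_positions_py digit_positions_py_alt
  rw [pvALoop_eq toks 0 _ (by simp) (by simp)]
  simp
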